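-- pv_equiv track=rewrite | github.com/kimD0ngjun/backjoon_programmers | 백준/Gold/27435. 파도반 수열 2/파도반 수열 2.py | power
-- ===== SOURCE A (Python) =====
-- MOD = 998_244_353
--
-- def matrix(a, b):
--     a1, a2, a3, a4, a5, a6, a7, a8, a9 = a
--     b1, b2, b3, b4, b5, b6, b7, b8, b9 = b
--
--     r1 = (a1 * b1 + a2 * b4 + a3 * b7) % MOD
--     r2 = (a1 * b2 + a2 * b5 + a3 * b8) % MOD
--     r3 = (a1 * b3 + a2 * b6 + a3 * b9) % MOD
--
--     r4 = (a4 * b1 + a5 * b4 + a6 * b7) % MOD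
--     r5 = (a4 * b2 + a5 * b5 + a6 * b8) % MOD
--     r6 = (a4 * b3 + a5 * b6 + a6 * b9) % MOD
--
--     r7 = (a7 * b1 + a8 * b4 + a9 * b7) % MOD
--     r8 = (a7 * b2 + a8 * b5 + a9 * b8) % MOD
--     r9 = (a7 * b3 + a8 * b6 + a9 * b9) % MOD
--
--     return r1, r2, r3, r4, r5, r6, r7, r8, r9
--
-- def power(N):
--     # 단위행렬부터 시작
--     result = (1, 0, 0, 0, 1, 0, 0, 0, 1)
--     unit = (0, 1, 1, 1, 0, 0, 0, 1, 0)
--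
--     while N > 0:
--         # 지수가 홀수일 때
--         if N % 2 != 0:
--             result = matrix(result, unit)
--
--         N = N // 2
--         unit = matrix(unit, unit)
--
--     return result
-- ===== SOURCE B (Python) =====
-- MOD = 998_244_353
--
--
-- def matrix(a, b):
--     a1, a2, a3, a4, a5, a6, a7, a8, a9 = a
--     b1, b2, b3, b4, b5, b6, b7, b8, b9 = b
--
--     r1 = (a1 * b1 + a2 * b4 + a3 * b7) % MOD
--     r2 = (a1 * b2 + a2 * b5 + a3 * b8) % MOD
--     r3 = (a1 * b3 + a2 * b6 + a3 * b9) % MOD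
--
--     r4 = (a4 * b1 + a5 * b4 + a6 * b7) % MOD
--     r5 = (a4 * b2 + a5 * b5 + a6 * b8) % MOD
--     r6 = (a4 * b3 + a5 * b6 + a6 * b9) % MOD
--
--     r7 = (a7 * b1 + a8 * b4 + a9 * b7) % MOD
--     r8 = (a7 * b2 + a8 * b5 + a9 * b8) % MOD
--     r9 = (a7 * b3 + a8 * b6 + a9 * b9) % MOD
--
--     return r1, r2, r3, r4, r5, r6, r7, r8, r9
--
--
-- def power(N):
--     # recursive divide-and-conquer: unit^N processed MSB-first
--     if N <= 0:
--         return (1, 0, 0, 0, 1, 0, 0, 0, 1)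
--     half = power(N // 2)
--     sq = matrix(half, half)
--     if N % 2 != 0:
--         sq = matrix(sq, (0, 1, 1, 1, 0, 0, 0, 1, 0))
--     return sq
-- ===== Notes on version B (the rewrite author's own statement) =====
-- stated objective: alternative
-- what changed: Replaced the iterative LSB-first square-and-multiply loop (accumulator times repeatedly-squared base) with a recursive MSB-first divide-and-conquer exponentiation: recurse on the halved exponent, square the recursive result, and multiply once by the base unit matrix when the exponent is odd; the matrix-multiply helper is kept.
import Mathlib
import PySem

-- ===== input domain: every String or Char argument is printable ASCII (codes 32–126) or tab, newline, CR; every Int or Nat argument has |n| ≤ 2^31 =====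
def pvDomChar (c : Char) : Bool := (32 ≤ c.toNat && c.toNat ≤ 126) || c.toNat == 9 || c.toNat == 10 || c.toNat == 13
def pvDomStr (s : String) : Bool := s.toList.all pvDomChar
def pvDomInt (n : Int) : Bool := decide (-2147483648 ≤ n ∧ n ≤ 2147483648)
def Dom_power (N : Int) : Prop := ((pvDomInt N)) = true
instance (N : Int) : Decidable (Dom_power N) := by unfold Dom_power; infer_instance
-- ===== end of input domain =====

-- B replaces A's iterative LSB-first square-and-multiply loop by a recursive MSB-first
-- divide-and-conquer exponentiation (same matrix-multiply helper, same cost): objective 'alternative'.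

abbrev M9 : Type := Int × Int × Int × Int × Int × Int × Int × Int × Int

-- the shared 3x3 modular multiply helper `matrix` (identical in A's source and in Source B)
def pyMatrix (a b : M9) : M9 :=
  match a, b with
  | (a1, a2, a3, a4, a5, a6, a7, a8, a9), (b1, b2, b3, b4, b5, b6, b7, b8, b9) =>
    (PySem.Int.mod (a1 * b1 + a2 * b4 + a3 * b7) 998244353,
     PySem.Int.mod (a1 * b2 + a2 * b5 + a3 * b8) 998244353,
     PySem.Int.mod (a1 * b3 + a2 * b6 + a3 * b9) 998244353,
     PySem.Int.mod (a4 * b1 + a5 * b4 + a6 * b7) 998244353,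
     PySem.Int.mod (a4 * b2 + a5 * b5 + a6 * b8) 998244353,
     PySem.Int.mod (a4 * b3 + a5 * b6 + a6 * b9) 998244353,
     PySem.Int.mod (a7 * b1 + a8 * b4 + a9 * b7) 998244353,
     PySem.Int.mod (a7 * b2 + a8 * b5 + a9 * b8) 998244353,
     PySem.Int.mod (a7 * b3 + a8 * b6 + a9 * b9) 998244353)

-- ===== PORT A =====
-- the `while N > 0` loop of A, with its two mutable variables as parameters
def powerLoop (N : Int) (result unit : M9) : M9 :=
  if _h : N > 0 then
    powerLoop (PySem.Int.floordiv N 2)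
      (if PySem.Int.mod N 2 ≠ 0 then pyMatrix result unit else result)
      (pyMatrix unit unit)
  else result
termination_by N.toNat
decreasing_by
  rw [PySem.Int.floordiv_eq_ediv_of_pos (by omega)]
  omega

def power (N : Int) : Int × Int × Int × Int × Int × Int × Int × Int × Int :=
  powerLoop N (1, 0, 0, 0, 1, 0, 0, 0, 1) (0, 1, 1, 1, 0, 0, 0, 1, 0)

-- ===== PORT B =====
def power_alt (N : Int) : Int × Int × Int × Int × Int × Int × Int × Int × Int :=
  if _h : N ≤ 0 then (1, 0, 0, 0, 1, 0, 0, 0, 1)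
  else
    let half := power_alt (PySem.Int.floordiv N 2)
    let sq := pyMatrix half half
    if PySem.Int.mod N 2 ≠ 0 then pyMatrix sq (0, 1, 1, 1, 0, 0, 0, 1, 0) else sq
termination_by N.toNat
decreasing_by
  rw [PySem.Int.floordiv_eq_ediv_of_pos (by omega)]
  omega

-- ===== PRECONDITION & SPEC =====
def Spec_power (N : Int) (out : Int × Int × Int × Int × Int × Int × Int × Int × Int) : Prop := out = power_alt N
instance (N : Int) (out : Int × Int × Int × Int × Int × Int × Int × Int × Int) : Decidable (Spec_power N out) := by
  unfold Spec_power
  letI d2 : DecidableEq (Int × Int) := instDecidableEqProd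
  letI d3 : DecidableEq (Int × Int × Int) := @instDecidableEqProd _ _ _ d2
  letI d4 : DecidableEq (Int × Int × Int × Int) := @instDecidableEqProd _ _ _ d3
  letI d5 : DecidableEq (Int × Int × Int × Int × Int) := @instDecidableEqProd _ _ _ d4
  letI d6 : DecidableEq (Int × Int × Int × Int × Int × Int) := @instDecidableEqProd _ _ _ d5
  letI d7 : DecidableEq (Int × Int × Int × Int × Int × Int × Int) := @instDecidableEqProd _ _ _ d6
  letI d8 : DecidableEq (Int × Int × Int × Int × Int × Int × Int × Int) := @instDecidableEqProd _ _ _ d7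
  exact @instDecidableEqProd _ _ _ d8 out (power_alt N)

-- ===== CLAIM (what is proved, stated in full; the proofs are below) =====
def Claim_equal_power : Prop := ∀ (N : Int), Dom_power N → Spec_power N (power N)

-- ===== LEMMAS AND PROOFS =====

-- semantics: a tuple read as a 3x3 matrix over ZMod 998244353
def toM (t : M9) : Matrix (Fin 3) (Fin 3) (ZMod 998244353) :=
  match t with
  | (a1, a2, a3, a4, a5, a6, a7, a8, a9) =>
    !![(a1 : ZMod 998244353), a2, a3; a4, a5, a6; a7, a8, a9]

-- every component lies in [0, MOD)
def normT (t : M9) : Prop :=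
  match t with
  | (a1, a2, a3, a4, a5, a6, a7, a8, a9) =>
    (0 ≤ a1 ∧ a1 < 998244353) ∧ (0 ≤ a2 ∧ a2 < 998244353) ∧ (0 ≤ a3 ∧ a3 < 998244353) ∧
    (0 ≤ a4 ∧ a4 < 998244353) ∧ (0 ≤ a5 ∧ a5 < 998244353) ∧ (0 ≤ a6 ∧ a6 < 998244353) ∧
    (0 ≤ a7 ∧ a7 < 998244353) ∧ (0 ≤ a8 ∧ a8 < 998244353) ∧ (0 ≤ a9 ∧ a9 < 998244353)

theorem castEmod (a : Int) :
    ((a % (998244353 : Int) : Int) : ZMod 998244353) = (a : ZMod 998244353) := by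
  exact_mod_cast ZMod.intCast_mod a 998244353

set_option maxHeartbeats 1000000 in
theorem toM_mul (a b : M9) : toM (pyMatrix a b) = toM a * toM b := by
  obtain ⟨a1, a2, a3, a4, a5, a6, a7, a8, a9⟩ := a
  obtain ⟨b1, b2, b3, b4, b5, b6, b7, b8, b9⟩ := b
  simp only [pyMatrix, toM]
  ext i j
  fin_cases i <;> fin_cases j <;>
    simp [Matrix.mul_apply, Fin.sum_univ_three, castEmod]

theorem toM_one : toM (1, 0, 0, 0, 1, 0, 0, 0, 1) = 1 := by
  simp only [toM]
  ext i j
  fin_cases i <;> fin_cases j <;> simp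

theorem norm_pyMatrix (a b : M9) : normT (pyMatrix a b) := by
  obtain ⟨a1, a2, a3, a4, a5, a6, a7, a8, a9⟩ := a
  obtain ⟨b1, b2, b3, b4, b5, b6, b7, b8, b9⟩ := b
  simp only [pyMatrix, normT, PySem.Int.mod_eq_emod_of_pos (show (0:Int) < 998244353 by norm_num)]
  refine ⟨?_, ?_, ?_, ?_, ?_, ?_, ?_, ?_, ?_⟩ <;> omega

theorem norm_one : normT (1, 0, 0, 0, 1, 0, 0, 0, 1) := by
  simp only [normT]; norm_num

theorem castInj (a b : Int) (ha : 0 ≤ a ∧ a < 998244353) (hb : 0 ≤ b ∧ b < 998244353)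
    (h : (a : ZMod 998244353) = b) : a = b := by
  rw [ZMod.intCast_eq_intCast_iff'] at h
  omega

theorem toM_inj (a b : M9) (ha : normT a) (hb : normT b) (h : toM a = toM b) : a = b := by
  obtain ⟨a1, a2, a3, a4, a5, a6, a7, a8, a9⟩ := a
  obtain ⟨b1, b2, b3, b4, b5, b6, b7, b8, b9⟩ := b
  simp only [toM] at h
  simp only [normT] at ha hb
  have h00 := congrFun (congrFun h 0) 0
  have h01 := congrFun (congrFun h 0) 1
  have h02 := congrFun (congrFun h 0) 2
  have h10 := congrFun (congrFun h 1) 0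
  have h11 := congrFun (congrFun h 1) 1
  have h12 := congrFun (congrFun h 1) 2
  have h20 := congrFun (congrFun h 2) 0
  have h21 := congrFun (congrFun h 2) 1
  have h22 := congrFun (congrFun h 2) 2
  exact Prod.ext (castInj _ _ ha.1 hb.1 h00) (Prod.ext (castInj _ _ ha.2.1 hb.2.1 h01)
    (Prod.ext (castInj _ _ ha.2.2.1 hb.2.2.1 h02) (Prod.ext (castInj _ _ ha.2.2.2.1 hb.2.2.2.1 h10)
    (Prod.ext (castInj _ _ ha.2.2.2.2.1 hb.2.2.2.2.1 h11)
    (Prod.ext (castInj _ _ ha.2.2.2.2.2.1 hb.2.2.2.2.2.1 h12)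
    (Prod.ext (castInj _ _ ha.2.2.2.2.2.2.1 hb.2.2.2.2.2.2.1 h20)
    (Prod.ext (castInj _ _ ha.2.2.2.2.2.2.2.1 hb.2.2.2.2.2.2.2.1 h21)
    (castInj _ _ ha.2.2.2.2.2.2.2.2 hb.2.2.2.2.2.2.2.2 h22))))))))

-- A's loop: its result is the accumulator times unit^N
theorem powerLoop_sem (N : Int) (result unit : M9) :
    toM (powerLoop N result unit) = toM result * toM unit ^ N.toNat := by
  induction N, result, unit using powerLoop.induct with
  | case1 N result unit h ih =>
    rw [powerLoop, dif_pos h]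
    rw [PySem.Int.floordiv_eq_ediv_of_pos (show (0:Int) < 2 by norm_num),
        PySem.Int.mod_eq_emod_of_pos (show (0:Int) < 2 by norm_num)] at ih ⊢
    by_cases hodd : N % 2 ≠ 0
    · rw [dif_pos hodd] at ih
      rw [if_pos hodd, ih, toM_mul, toM_mul, ← pow_two, ← pow_mul, mul_assoc, ← pow_succ',
          show 2 * (N / 2).toNat + 1 = N.toNat from by omega]
    · rw [dif_neg hodd] at ih
      rw [if_neg hodd, ih, toM_mul, ← pow_two, ← pow_mul,
          show 2 * (N / 2).toNat = N.toNat from by omega]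
  | case2 N result unit h =>
    rw [powerLoop, dif_neg h, show N.toNat = 0 from by omega, pow_zero, mul_one]

-- A's loop keeps the accumulator reduced
theorem powerLoop_norm (N : Int) (result unit : M9) :
    normT result → normT (powerLoop N result unit) := by
  induction N, result, unit using powerLoop.induct with
  | case1 N result unit h ih =>
    intro hr
    rw [powerLoop, dif_pos h]
    refine ih ?_
    split
    · exact norm_pyMatrix _ _
    · exact hr
  | case2 N result unit h =>
    intro hr
    rw [powerLoop, dif_neg h]
    exact hr

-- B's recursion computes unit^N
theorem power_alt_sem (N : Int) :
    toM (power_alt N) = toM (0, 1, 1, 1, 0, 0, 0, 1, 0) ^ N.toNat := by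
  induction N using power_alt.induct with
  | case1 N h =>
    rw [power_alt, dif_pos h, toM_one, show N.toNat = 0 from by omega, pow_zero]
  | case2 N hpos hodd ih =>
    rw [power_alt, dif_neg hpos, if_pos hodd]
    rw [PySem.Int.floordiv_eq_ediv_of_pos (show (0:Int) < 2 by norm_num)] at ih
    rw [PySem.Int.mod_eq_emod_of_pos (show (0:Int) < 2 by norm_num)] at hodd
    rw [PySem.Int.floordiv_eq_ediv_of_pos (show (0:Int) < 2 by norm_num), toM_mul, toM_mul, ih,
        ← pow_add, ← pow_succ,
        show (N / 2).toNat + (N / 2).toNat + 1 = N.toNat from by omega]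
  | case3 N hpos heven ih =>
    rw [power_alt, dif_neg hpos, if_neg heven]
    rw [PySem.Int.floordiv_eq_ediv_of_pos (show (0:Int) < 2 by norm_num)] at ih
    rw [PySem.Int.mod_eq_emod_of_pos (show (0:Int) < 2 by norm_num)] at heven
    rw [PySem.Int.floordiv_eq_ediv_of_pos (show (0:Int) < 2 by norm_num), toM_mul, ih,
        ← pow_add, show (N / 2).toNat + (N / 2).toNat = N.toNat from by omega]

-- B's result is reduced (or is the identity literal)
theorem power_alt_norm (N : Int) : normT (power_alt N) := by
  rw [power_alt]
  split
  · exact norm_one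
  · split
    · exact norm_pyMatrix _ _
    · exact norm_pyMatrix _ _

-- ===== VERDICT (by name: the statement is the Claim_ definition above) =====
theorem power_spec : Claim_equal_power := by
  intro N _
  unfold Spec_power power
  apply toM_inj
  · exact powerLoop_norm _ _ _ norm_one
  · exact power_alt_norm N
  · rw [powerLoop_sem, power_alt_sem, toM_one, one_mul]
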